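-- pv_equiv track=rewrite | github.com/hienpham15/Codeforces_competitions | Codeforces_round728/A.py | func
-- ===== SOURCE A (Python) =====
-- def func(n):
--     cat = []
--
--     if n%2 == 0:
--         pairs_2s = n//2
--         pairs_3s = 0
--         for i in range(pairs_2s):
--             cat.append(2*(i + 1))
--             cat.append(2*i + 1)
--
--     elif n%2 != 0:
--         pairs_2s = (n//2) - 1
--         for i in range(pairs_2s):
--             cat.append(2*(i + 1))
--             cat.append(2*i + 1)
--         cat.append((pairs_2s)*2 + 3)
--         cat.append((pairs_2s)*2 + 1)
--         cat.append((pairs_2s)*2 + 2)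
--
--     return cat
-- ===== SOURCE B (Python) =====
-- def func(n):
--     if n % 2 == 0:
--         return [i + 2 if i % 2 == 0 else i for i in range(n)]
--     return [i + 2 if i % 2 == 0 else i for i in range(n - 3)] + [n, n - 2, n - 1]
-- ===== Notes on version B (the rewrite author's own statement) =====
-- stated objective: simpler
-- what changed: Replaced the pair-counter loop that appends two derived values per iteration with a per-index closed form (i+2 at even positions, i at odd) as a single comprehension, plus a fixed three-element tail for odd n.
import Mathlib
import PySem

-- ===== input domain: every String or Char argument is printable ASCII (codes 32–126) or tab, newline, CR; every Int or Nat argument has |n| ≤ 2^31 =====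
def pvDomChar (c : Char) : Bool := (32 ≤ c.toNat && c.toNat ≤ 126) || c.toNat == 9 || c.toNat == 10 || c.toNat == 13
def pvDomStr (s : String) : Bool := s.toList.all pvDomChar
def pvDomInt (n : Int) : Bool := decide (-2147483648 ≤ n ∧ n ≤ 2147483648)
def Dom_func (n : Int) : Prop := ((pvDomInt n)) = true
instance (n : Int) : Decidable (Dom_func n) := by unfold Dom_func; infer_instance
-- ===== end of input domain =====

-- B replaces A's pair-counter loop (two appends per iteration) with a per-index
-- closed form over range(n) (even n) / range(n-3) plus a fixed 3-element tail (odd n); objective: simpler.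

-- ===== PORT A =====
def func (n : Int) : List Int :=
  if PySem.Int.mod n 2 = 0 then
    let pairs_2s := PySem.Int.floordiv n 2
    (PySem.List.pyRange 0 pairs_2s 1).foldl
      (fun cat i => cat ++ [2 * (i + 1), 2 * i + 1]) []
  else
    let pairs_2s := PySem.Int.floordiv n 2 - 1
    ((PySem.List.pyRange 0 pairs_2s 1).foldl
      (fun cat i => cat ++ [2 * (i + 1), 2 * i + 1]) [])
      ++ [pairs_2s * 2 + 3, pairs_2s * 2 + 1, pairs_2s * 2 + 2]

-- ===== PORT B =====
def func_alt (n : Int) : List Int :=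
  if PySem.Int.mod n 2 = 0 then
    (PySem.List.pyRange 0 n 1).map (fun i => if PySem.Int.mod i 2 = 0 then i + 2 else i)
  else
    (PySem.List.pyRange 0 (n - 3) 1).map (fun i => if PySem.Int.mod i 2 = 0 then i + 2 else i)
      ++ [n, n - 2, n - 1]

-- ===== PRECONDITION & SPEC =====
def Spec_func (n : Int) (out : List Int) : Prop := out = func_alt n
instance (n : Int) (out : List Int) : Decidable (Spec_func n out) := by unfold Spec_func; infer_instance

-- ===== CLAIM (what is proved, stated in full; the proofs are below) =====
def Claim_equal_func : Prop := ∀ (n : Int), Dom_func n → Spec_func n (func n)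

-- ===== LEMMAS AND PROOFS =====

-- The comprehension over range(2m) equals the flatMap of pair-blocks over range(m).
theorem pv_map_eq_flatMap (k : Nat) :
    (PySem.List.pyRange 0 (2 * (k : Int)) 1).map
        (fun i => if PySem.Int.mod i 2 = 0 then i + 2 else i)
      = (PySem.List.pyRange 0 (k : Int) 1).flatMap
          (fun i => [2 * (i + 1), 2 * i + 1]) := by
  induction k with
  | zero => simp [PySem.List.pyRange_one_eq_nil]
  | succ k ih =>
    have h1 : (PySem.List.pyRange 0 ((k : Int) + 1) 1)
        = PySem.List.pyRange 0 (k : Int) 1 ++ [(k : Int)] :=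
      PySem.List.pyRange_one_succ_right (by positivity)
    have h2 : (2 : Int) * ((k : Int) + 1) = (2 * (k : Int) + 1) + 1 := by ring
    have h3 : (PySem.List.pyRange 0 (2 * ((k : Int) + 1)) 1)
        = PySem.List.pyRange 0 (2 * (k : Int)) 1 ++ [2 * (k : Int)] ++ [2 * (k : Int) + 1] := by
      rw [h2, PySem.List.pyRange_one_succ_right (by positivity),
        PySem.List.pyRange_one_succ_right (by positivity)]
    push_cast
    rw [h3, h1]
    simp only [List.map_append, List.flatMap_append, ih]
    have he : PySem.Int.mod (2 * (k : Int)) 2 = 0 := by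
      simp [PySem.Int.mod]
    have ho : PySem.Int.mod (2 * (k : Int) + 1) 2 ≠ 0 := by
      simp [PySem.Int.mod]
    simp
    ring_nf

theorem pv_foldl_eq_flatMap (m : Int) :
    (PySem.List.pyRange 0 m 1).foldl (fun cat i => cat ++ [2 * (i + 1), 2 * i + 1]) []
      = (PySem.List.pyRange 0 m 1).flatMap (fun i => [2 * (i + 1), 2 * i + 1]) := by
  simpa using PySem.List.foldl_append_eq_flatMap
    (l := PySem.List.pyRange 0 m 1) (g := fun i : Int => [2 * (i + 1), 2 * i + 1]) (acc := [])

theorem pv_floordiv_two (n : Int) : PySem.Int.floordiv n 2 = n / 2 := by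
  simp only [PySem.Int.floordiv]
  exact Int.fdiv_eq_ediv_of_nonneg n (by norm_num)

theorem pv_mod_two (n : Int) : PySem.Int.mod n 2 = n % 2 := by
  simp [PySem.Int.mod, Int.fmod_eq_emod]

-- ===== VERDICT (by name: the statement is the Claim_ definition above) =====
theorem func_spec : Claim_equal_func := by
  intro n _
  unfold Spec_func func func_alt
  have hfd := pv_floordiv_two n
  have hfm := pv_mod_two n
  by_cases h : PySem.Int.mod n 2 = 0
  · simp only [h, if_true]
    rw [pv_foldl_eq_flatMap]
    by_cases hn : 0 ≤ n
    · obtain ⟨k, hk⟩ : ∃ k : Nat, PySem.Int.floordiv n 2 = (k : Int) :=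
        ⟨(PySem.Int.floordiv n 2).toNat, by rw [hfd]; omega⟩
      have hn2 : n = 2 * (k : Int) := by rw [hfd] at hk; rw [hfm] at h; omega
      rw [hk, hn2]
      exact (pv_map_eq_flatMap k).symm
    · have h2 : PySem.Int.floordiv n 2 ≤ 0 := by rw [hfd]; omega
      simp [PySem.List.pyRange_one_eq_nil (show n ≤ (0:Int) by omega)]
      intro x hx
      omega
  · simp only [h, if_false]
    rw [pv_foldl_eq_flatMap]
    have hodd : n % 2 = 1 := by rw [hfm] at h; omega
    have hp2 : 2 * (PySem.Int.floordiv n 2 - 1) = n - 3 := by rw [hfd]; omega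
    have t1 : (PySem.Int.floordiv n 2 - 1) * 2 + 3 = n := by omega
    have t2 : (PySem.Int.floordiv n 2 - 1) * 2 + 1 = n - 2 := by omega
    have t3 : (PySem.Int.floordiv n 2 - 1) * 2 + 2 = n - 1 := by omega
    rw [t1, t2, t3]
    by_cases hn : 3 ≤ n
    · obtain ⟨k, hk⟩ : ∃ k : Nat, PySem.Int.floordiv n 2 - 1 = (k : Int) :=
        ⟨(PySem.Int.floordiv n 2 - 1).toNat, by rw [hfd]; omega⟩
      have hn3 : n - 3 = 2 * (k : Int) := by omega
      rw [hk, hn3]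
      rw [pv_map_eq_flatMap k]
    · rw [PySem.List.pyRange_one_eq_nil (by omega : n - 3 ≤ (0:Int)),
          PySem.List.pyRange_one_eq_nil (by omega : PySem.Int.floordiv n 2 - 1 ≤ (0:Int))]
      simp
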